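-- pv_equiv track=rewrite | github.com/T300Y/encyrptio | Encyrption_SDD_AT1/main.py | v_c
-- ===== SOURCE A (Python) =====
-- def v_c(message_arr, n):
--     vowels = set("aeiouAEIOU")
--     consonants_groups = []
--     vowels_indices = [i for i, char in enumerate(message_arr) if char in vowels]
--     consonants_indices_group = []
--     for i in range(len(message_arr)):
--         if message_arr[i].isalpha():
--             if message_arr[i] not in vowels:
--                 consonants_indices_group.append(i)
--         else:
--             if consonants_indices_group:
--                 consonants_groups.append(consonants_indices_group)
--                 consonants_indices_group = []
--     consonants_groups.append(consonants_indices_group)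
--     vowels_indices = vowels_indices[1:] + [vowels_indices[0]]
--     for group in consonants_groups:
--         group[:] = group[-1:] + group[:-1]
--     message_copy = message_arr.copy()
--     for i in range(len(message_arr)):
--         if not message_arr[i].isalpha():
--             continue
--         if message_copy[i] in ["a", "e", "i", "o", "u", "A", "E", "I", "O", "U"] and vowels_indices:
--             message_arr[i] = message_copy[vowels_indices[0]]
--             vowels_indices.pop(0)
--         elif consonants_groups and message_copy[i].lower() not in ["a", "e", "i", "o", "u"]:
--             message_arr[i] = message_copy[consonants_groups[0][0]]
--             consonants_groups[0].pop(0)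
--             if not consonants_groups[0]:
--                 consonants_groups.pop(0)
--     message = ''.join([item for item in message_arr])
--
--     return message
-- ===== SOURCE B (Python) =====
-- def v_c(message_arr, n):
--     vowels = set("aeiouAEIOU")
--     vpos = [i for i, ch in enumerate(message_arr) if ch in vowels]
--     groups = []
--     cur = []
--     for i, ch in enumerate(message_arr):
--         if ch.isalpha():
--             if ch not in vowels:
--                 cur.append(i)
--         elif cur:
--             groups.append(cur)
--             cur = []
--     if cur:
--         groups.append(cur)
--     rotated_v = vpos[1:] + [vpos[0]]   # IndexError when there is no vowel, before any mutation
--     perm = list(range(len(message_arr)))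
--     for p, q in zip(vpos, rotated_v):
--         perm[p] = q
--     for g in groups:
--         for p, q in zip(g, g[-1:] + g[:-1]):
--             perm[p] = q
--     orig = list(message_arr)
--     message_arr[:] = [orig[perm[i]] for i in range(len(message_arr))]
--     return ''.join(message_arr)
-- ===== Notes on version B (the rewrite author's own statement) =====
-- stated objective: faster
-- what changed: B replaces A's replay scan that re-walks the message consuming vowel/group index queues (with pop(0) and group deletion) by building one permutation table (identity, then the vowel cycle and each group's rotation written in) and applying it in a single pass.
import Mathlib
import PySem

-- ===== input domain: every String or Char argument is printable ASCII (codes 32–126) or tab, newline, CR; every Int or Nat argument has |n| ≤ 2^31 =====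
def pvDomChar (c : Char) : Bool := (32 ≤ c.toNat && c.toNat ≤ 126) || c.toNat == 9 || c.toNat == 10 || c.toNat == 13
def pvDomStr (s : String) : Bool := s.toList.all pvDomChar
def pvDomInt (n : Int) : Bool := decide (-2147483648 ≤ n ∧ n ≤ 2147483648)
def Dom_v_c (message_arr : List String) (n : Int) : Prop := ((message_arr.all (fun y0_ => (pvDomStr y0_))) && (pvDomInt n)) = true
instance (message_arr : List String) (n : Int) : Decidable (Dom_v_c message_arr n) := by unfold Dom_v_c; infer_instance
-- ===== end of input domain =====

-- B replaces A's replay scan (which re-walks the message consuming vowel/group index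
-- queues with pop(0)) by one permutation table applied in a single pass; equivalence is
-- about the returned string (both Pythons also mutate message_arr in place identically).

-- ===== PORT A =====
-- the ten strings of set("aeiouAEIOU") (a 'char in set' test on one-char strings)
def vcVowels : List String := ["a", "e", "i", "o", "u", "A", "E", "I", "O", "U"]
def vcLowVowels : List String := ["a", "e", "i", "o", "u"]

-- group[-1:] + group[:-1]  (both Pythons contain this exact expression)
def vcRotR (g : List Nat) : List Nat :=
  g.drop (g.length - 1) ++ g.take (g.length - 1)

-- body of A's first for-loop (building consonants_groups / consonants_indices_group)
def vcGroupStep (message_arr : List String) (st : List (List Nat) × List Nat) (i : Nat) :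
    List (List Nat) × List Nat :=
  let s := message_arr.getD i ""
  if PySem.Str.strIsalpha s then
    if s ∈ vcVowels then st else (st.1, st.2 ++ [i])
  else
    if st.2 ≠ [] then (st.1 ++ [st.2], []) else st

-- body of A's reconstruction for-loop; state = (message_arr, vowels_indices, consonants_groups)
def vcReplayStep (copy : List String) (st : List String × List Nat × List (List Nat)) (i : Nat) :
    List String × List Nat × List (List Nat) :=
  let msg := st.1
  let vq := st.2.1
  let gq := st.2.2
  if ¬ (PySem.Str.strIsalpha (msg.getD i "") = true) then st
  else if copy.getD i "" ∈ vcVowels ∧ vq ≠ [] then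
    (msg.set i (copy.getD (vq.headD 0) ""), vq.tail, gq)
  else if gq ≠ [] ∧ PySem.Str.lower (copy.getD i "") ∉ vcLowVowels then
    let g := gq.headD []
    let msg' := msg.set i (copy.getD (g.headD 0) "")
    (msg', vq, if g.tail = [] then gq.tail else g.tail :: gq.tail)
  else st

def v_c (message_arr : List String) (n : Int) : String :=
  -- vowels_indices = [i for i, char in enumerate(message_arr) if char in vowels]
  let vowels_indices0 :=
    (List.range message_arr.length).filter (fun i => message_arr.getD i "" ∈ vcVowels)
  -- first for-loop over range(len(message_arr))
  let st := (List.range message_arr.length).foldl (vcGroupStep message_arr) ([], [])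
  -- consonants_groups.append(consonants_indices_group)  (unconditionally)
  let consonants_groups0 := st.1 ++ [st.2]
  -- vowels_indices = vowels_indices[1:] + [vowels_indices[0]]
  -- (on a vowel-free message Python raises IndexError here: those inputs are outside Pre_)
  let vowels_indices := vowels_indices0.drop 1 ++ vowels_indices0.take 1
  -- for group in consonants_groups: group[:] = group[-1:] + group[:-1]
  let consonants_groups := consonants_groups0.map vcRotR
  -- reconstruction loop (message_copy = message_arr.copy())
  let fin := (List.range message_arr.length).foldl (vcReplayStep message_arr)
      (message_arr, vowels_indices, consonants_groups)
  -- ''.join([item for item in message_arr])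
  PySem.Str.join "" fin.1

-- ===== PORT B =====
-- B's collection loop over enumerate(message_arr): same step as A's, but B appends the
-- last run only when non-empty
def v_c_alt (message_arr : List String) (n : Int) : String :=
  let L := message_arr.length
  let vpos := (List.range L).filter (fun i => message_arr.getD i "" ∈ vcVowels)
  let st := (List.range L).foldl (vcGroupStep message_arr) ([], [])
  let groups := st.1 ++ (if st.2 = [] then [] else [st.2])
  -- rotated_v = vpos[1:] + [vpos[0]]  (IndexError on a vowel-free message: outside Pre_)
  let rotated_v := vpos.drop 1 ++ vpos.take 1
  -- perm = identity; write the vowel cycle, then each group's rotation, into it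
  let perm0 := List.range L
  let perm1 := (vpos.zip rotated_v).foldl (fun pm pq => pm.set pq.1 pq.2) perm0
  let perm := groups.foldl
      (fun pm g => (g.zip (vcRotR g)).foldl (fun pm pq => pm.set pq.1 pq.2) pm) perm1
  -- message_arr[:] = [orig[perm[i]] for i in range(len(message_arr))]; ''.join(...)
  let out := (List.range L).map (fun i => message_arr.getD (perm.getD i i) "")
  PySem.Str.join "" out

-- ===== PRECONDITION & SPEC =====
-- Pre_ excludes exactly the messages containing no vowel element: there Python A raises
-- IndexError on vowels_indices[0] (and Python B raises the same way), returning nothing.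
def Pre_v_c (message_arr : List String) (n : Int) : Prop :=
  ∃ s ∈ message_arr, s ∈ vcVowels
instance (message_arr : List String) (n : Int) : Decidable (Pre_v_c message_arr n) := by
  unfold Pre_v_c; infer_instance
def pvWitness_v_c : List String × Int := (["h", "i", "!", "x"], 0)

def Spec_v_c (message_arr : List String) (n : Int) (out : String) : Prop := out = v_c_alt message_arr n
instance (message_arr : List String) (n : Int) (out : String) : Decidable (Spec_v_c message_arr n out) := by unfold Spec_v_c; infer_instance

-- ===== CLAIM (what is proved, stated in full; the proofs are below) =====
def Claim_equal_v_c : Prop := ∀ (message_arr : List String) (n : Int), Dom_v_c message_arr n → Pre_v_c message_arr n → Spec_v_c message_arr n (v_c message_arr n)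

-- ===== LEMMAS AND PROOFS =====

-- Abbreviations for the data both ports derive from the message
def pvEl (va : List String) (i : Nat) : String := va.getD i ""
def pvVpos (va : List String) : List Nat :=
  (List.range va.length).filter (fun i => va.getD i "" ∈ vcVowels)
def pvRotV (va : List String) : List Nat := (pvVpos va).drop 1 ++ (pvVpos va).take 1
def pvSt (va : List String) : List (List Nat) × List Nat :=
  (List.range va.length).foldl (vcGroupStep va) ([], [])
def pvReal (va : List String) : List (List Nat) :=
  (pvSt va).1 ++ (if (pvSt va).2 = [] then [] else [(pvSt va).2])
def pvBC (va : List String) (i : Nat) : Bool :=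
  PySem.Str.strIsalpha (pvEl va i) && !(vcVowels.contains (pvEl va i))
def pvCpos (va : List String) : List Nat := (List.range va.length).filter (pvBC va)
def pvX (va : List String) : List (List Nat) := (pvReal va).map vcRotR
def pvRotC (va : List String) : List Nat := (pvX va).flatten
def pvP (va : List String) : List (Nat × Nat) :=
  (pvVpos va).zip (pvRotV va) ++ (pvCpos va).zip (pvRotC va)
def pvSigma (va : List String) (i : Nat) : Nat :=
  (((pvP va).find? (fun pq => pq.1 == i)).map Prod.snd).getD i

-- counters
def pvCnt (l : List Nat) (k : Nat) : Nat := l.countP (fun x => decide (x < k))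

-- the queue of rotated groups after n consonant consumptions
def pvConsume : Nat → List (List Nat) → List (List Nat)
  | 0, gq => gq
  | _ + 1, [] => []
  | n + 1, g :: rest => pvConsume n (if g.tail = [] then rest else g.tail :: rest)

def pvT (va : List String) : List (List Nat) := if (pvSt va).2 = [] then [[]] else []

-- ---- small facts about the helpers ----

lemma vcRotR_length (g : List Nat) : (vcRotR g).length = g.length := by
  simp only [vcRotR, List.length_append, List.length_drop, List.length_take]
  omega

lemma vowel_alpha {s : String} (h : s ∈ vcVowels) : PySem.Str.strIsalpha s = true := by
  fin_cases h <;> decide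

lemma lowerChar_vowel {c x : Char} (_hx : x ∈ (['a','e','i','o','u'] : List Char))
    (h : PySem.Chars.lowerChar c = x) : c = x ∨ c.toNat = x.toNat - 32 := by
  unfold PySem.Chars.lowerChar PySem.Chars.isupper at h
  split at h
  · rename_i hu
    simp only [Bool.and_eq_true, decide_eq_true_eq, Char.le_def, UInt32.le_iff_toNat_le] at hu
    have hb : 65 ≤ c.toNat ∧ c.toNat ≤ 90 := hu
    have hv : (c.toNat + 32).isValidChar := Or.inl (by omega)
    have h2 : (Char.ofNat (c.toNat + 32)).toNat = x.toNat := by rw [h]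
    rw [Char.toNat_ofNat, if_pos hv] at h2
    right
    omega
  · left; exact h

lemma toNat_eq_char {c d : Char} (h : c.toNat = d.toNat) : c = d :=
  Char.ext (UInt32.toNat_inj.mp h)

lemma toList_singleton_vowel {s : String} {c : Char} (h : s.toList = [c])
    (hc : c ∈ (['a','e','i','o','u','A','E','I','O','U'] : List Char)) : s ∈ vcVowels := by
  have hs : s = String.ofList [c] := by rw [← h]; exact String.ofList_toList.symm
  subst hs
  fin_cases hc <;> decide

lemma lower_case_map {s : String} {x : Char} (hEq : PySem.Str.lower s = String.ofList [x]) :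
    s.toList.map PySem.Chars.lowerChar = [x] := by
  have h2 := congrArg String.toList hEq
  rwa [PySem.Str.toList_lower, String.toList_ofList] at h2

lemma lower_mem {s : String} (h : PySem.Str.lower s ∈ vcLowVowels) : s ∈ vcVowels := by
  have hx : ∃ x ∈ (['a','e','i','o','u'] : List Char), s.toList.map PySem.Chars.lowerChar = [x] := by
    simp only [vcLowVowels, List.mem_cons, List.not_mem_nil, or_false] at h
    rcases h with h | h | h | h | h
    · exact ⟨'a', by simp, lower_case_map h⟩
    · exact ⟨'e', by simp, lower_case_map h⟩
    · exact ⟨'i', by simp, lower_case_map h⟩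
    · exact ⟨'o', by simp, lower_case_map h⟩
    · exact ⟨'u', by simp, lower_case_map h⟩
  obtain ⟨x, hxm, hmap⟩ := hx
  rw [List.map_eq_singleton_iff] at hmap
  obtain ⟨c, hcl, hlc⟩ := hmap
  rcases lowerChar_vowel hxm hlc with rfl | hnum
  · exact toList_singleton_vowel hcl (by fin_cases hxm <;> decide)
  · fin_cases hxm
    · exact toList_singleton_vowel hcl (by rw [toNat_eq_char (c := c) (d := 'A') (by rw [hnum]; decide)]; decide)
    · exact toList_singleton_vowel hcl (by rw [toNat_eq_char (c := c) (d := 'E') (by rw [hnum]; decide)]; decide)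
    · exact toList_singleton_vowel hcl (by rw [toNat_eq_char (c := c) (d := 'I') (by rw [hnum]; decide)]; decide)
    · exact toList_singleton_vowel hcl (by rw [toNat_eq_char (c := c) (d := 'O') (by rw [hnum]; decide)]; decide)
    · exact toList_singleton_vowel hcl (by rw [toNat_eq_char (c := c) (d := 'U') (by rw [hnum]; decide)]; decide)

-- ---- positions: membership, sortedness, lengths ----

lemma mem_vpos {va : List String} {k : Nat} :
    k ∈ pvVpos va ↔ k < va.length ∧ va.getD k "" ∈ vcVowels := by
  simp [pvVpos, pvEl, List.mem_filter, List.mem_range]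

lemma mem_cpos {va : List String} {k : Nat} :
    k ∈ pvCpos va ↔ k < va.length ∧ pvBC va k = true := by
  simp [pvCpos, List.mem_filter, List.mem_range]

lemma vpos_sorted (va : List String) : (pvVpos va).Pairwise (· < ·) :=
  List.pairwise_lt_range.filter _

lemma cpos_sorted (va : List String) : (pvCpos va).Pairwise (· < ·) :=
  List.pairwise_lt_range.filter _

lemma vpos_nodup (va : List String) : (pvVpos va).Nodup :=
  (vpos_sorted va).imp (fun h => Nat.ne_of_lt h)

lemma cpos_nodup (va : List String) : (pvCpos va).Nodup :=
  (cpos_sorted va).imp (fun h => Nat.ne_of_lt h)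

lemma vpos_cpos_disjoint {va : List String} {k : Nat} (h1 : k ∈ pvVpos va) :
    k ∉ pvCpos va := by
  intro h2
  have hv := (mem_vpos.mp h1).2
  have hc := (mem_cpos.mp h2).2
  simp only [pvBC, pvEl, Bool.and_eq_true, Bool.not_eq_true'] at hc
  rw [← List.contains_iff_mem] at hv
  rw [hv] at hc
  exact absurd hc.2 (by simp)

lemma rotV_length (va : List String) : (pvRotV va).length = (pvVpos va).length := by
  simp only [pvRotV, List.length_append, List.length_drop, List.length_take]
  omega

-- ---- the grouping loop ----

lemma bc_true {va : List String} {i : Nat} (hA : PySem.Str.strIsalpha (va.getD i "") = true)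
    (hV : va.getD i "" ∉ vcVowels) : pvBC va i = true := by
  simp only [pvBC, pvEl]
  rw [hA, show vcVowels.contains (va.getD i "") = false from by
    rw [← Bool.not_eq_true, List.contains_iff_mem]; exact hV]
  rfl

lemma bc_false_vowel {va : List String} {i : Nat} (hV : va.getD i "" ∈ vcVowels) :
    pvBC va i = false := by
  simp only [pvBC, pvEl]
  rw [List.contains_iff_mem.mpr hV]
  simp

lemma bc_false_nonalpha {va : List String} {i : Nat}
    (hA : ¬ PySem.Str.strIsalpha (va.getD i "") = true) : pvBC va i = false := by
  simp only [pvBC, pvEl]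
  rw [Bool.not_eq_true] at hA
  rw [hA, Bool.false_and]

lemma groupStep_vowel {va : List String} {st : List (List Nat) × List Nat} {i : Nat}
    (hA : PySem.Str.strIsalpha (va.getD i "") = true) (hV : va.getD i "" ∈ vcVowels) :
    vcGroupStep va st i = st := by
  simp only [vcGroupStep]
  rw [if_pos hA, if_pos hV]

lemma groupStep_cons {va : List String} {st : List (List Nat) × List Nat} {i : Nat}
    (hA : PySem.Str.strIsalpha (va.getD i "") = true) (hV : va.getD i "" ∉ vcVowels) :
    vcGroupStep va st i = (st.1, st.2 ++ [i]) := by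
  simp only [vcGroupStep]
  rw [if_pos hA, if_neg hV]

lemma groupStep_skip {va : List String} {st : List (List Nat) × List Nat} {i : Nat}
    (hA : ¬ PySem.Str.strIsalpha (va.getD i "") = true) (hc : st.2 = []) :
    vcGroupStep va st i = st := by
  simp only [vcGroupStep]
  rw [if_neg hA, if_neg (by simpa using hc)]

lemma groupStep_flush {va : List String} {st : List (List Nat) × List Nat} {i : Nat}
    (hA : ¬ PySem.Str.strIsalpha (va.getD i "") = true) (hc : st.2 ≠ []) :
    vcGroupStep va st i = (st.1 ++ [st.2], []) := by
  simp only [vcGroupStep]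
  rw [if_neg hA, if_pos hc]

lemma group_fold (va : List String) (l : List Nat) :
    ∀ (gs : List (List Nat)) (cur : List Nat), (∀ g ∈ gs, g ≠ []) →
    (∀ g ∈ (l.foldl (vcGroupStep va) (gs, cur)).1, g ≠ []) ∧
      (l.foldl (vcGroupStep va) (gs, cur)).1.flatten ++ (l.foldl (vcGroupStep va) (gs, cur)).2
        = gs.flatten ++ cur ++ l.filter (pvBC va) := by
  induction l with
  | nil => intro gs cur hne; exact ⟨hne, by simp⟩
  | cons i t ih =>
    intro gs cur hne
    rw [List.foldl_cons, List.filter_cons]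
    by_cases hA : PySem.Str.strIsalpha (va.getD i "") = true
    · by_cases hV : va.getD i "" ∈ vcVowels
      · rw [bc_false_vowel hV, groupStep_vowel hA hV]
        simpa using ih gs cur hne
      · rw [bc_true hA hV, groupStep_cons hA hV]
        have := ih gs (cur ++ [i]) hne
        simp only [if_true]
        rw [this.2]
        exact ⟨this.1, by simp⟩
    · rw [bc_false_nonalpha hA]
      by_cases hc : cur = []
      · rw [groupStep_skip hA hc]
        simpa using ih gs cur hne
      · rw [groupStep_flush hA hc]
        have hne' : ∀ g ∈ gs ++ [cur], g ≠ [] := by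
          intro g hg
          rcases List.mem_append.mp hg with h | h
          · exact hne g h
          · simp at h; subst h; exact hc
        have := ih (gs ++ [cur]) [] hne'
        rw [this.2]
        exact ⟨this.1, by simp⟩

lemma real_nonempty {va : List String} : ∀ g ∈ pvReal va, g ≠ [] := by
  intro g hg
  have h := group_fold va (List.range va.length) [] [] (by simp)
  rcases List.mem_append.mp hg with h1 | h1
  · exact h.1 g h1
  · by_cases hc : (pvSt va).2 = []
    · simp [hc] at h1
    · simp [hc] at h1; subst h1; exact hc

lemma real_flatten (va : List String) : (pvReal va).flatten = pvCpos va := by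
  have h := (group_fold va (List.range va.length) [] [] (by simp)).2
  simp only [List.flatten_nil, List.nil_append] at h
  have h2 : (pvSt va).1.flatten ++ (pvSt va).2 = pvCpos va := h
  by_cases hc : (pvSt va).2 = []
  · unfold pvReal
    rw [if_pos hc, List.append_nil]
    rw [hc, List.append_nil] at h2
    exact h2
  · unfold pvReal
    rw [if_neg hc, List.flatten_append]
    simpa using h2

lemma rotC_length (va : List String) : (pvRotC va).length = (pvCpos va).length := by
  rw [← real_flatten va]
  simp only [pvRotC, pvX]
  induction pvReal va with
  | nil => rfl
  | cons g t ih => simp [vcRotR_length, ih]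

-- ---- counters ----

lemma cnt_zero (l : List Nat) : pvCnt l 0 = 0 := by
  simp [pvCnt]

lemma cnt_cons (a : Nat) (t : List Nat) (m : Nat) :
    pvCnt (a :: t) m = pvCnt t m + (if a < m then 1 else 0) := by
  simp only [pvCnt, List.countP_cons]
  by_cases h : a < m <;> simp [h]

lemma cnt_succ (l : List Nat) (k : Nat) : pvCnt l (k + 1) = pvCnt l k + l.count k := by
  induction l with
  | nil => rfl
  | cons a t ih =>
    rw [cnt_cons, cnt_cons, List.count_cons, ih]
    rcases Nat.lt_trichotomy a k with h | h | h
    · simp only [if_pos (Nat.lt_succ_of_lt h), if_pos h,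
        show (a == k) = false from by simpa using Nat.ne_of_lt h]
      simp <;> omega
    · subst h
      simp only [if_pos (Nat.lt_succ_self a), if_neg (Nat.lt_irrefl a), BEq.rfl]
      simp <;> omega
    · simp only [if_neg (show ¬ a < k + 1 by omega), if_neg (Nat.not_lt_of_lt h),
        show (a == k) = false from by simpa using Nat.ne_of_gt h]
      simp

lemma cnt_lt_of_mem {l : List Nat} {k : Nat} (hm : k ∈ l) : pvCnt l k < l.length := by
  rcases Nat.lt_or_ge (pvCnt l k) l.length with h | h
  · exact h
  · exfalso
    have he : pvCnt l k = l.length := Nat.le_antisymm List.countP_le_length h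
    have := List.countP_eq_length.mp he k hm
    simp at this

lemma count_nodup_mem {l : List Nat} {k : Nat} (hnd : l.Nodup) (hm : k ∈ l) : l.count k = 1 :=
  Nat.le_antisymm (List.nodup_iff_count_le_one.mp hnd k) (List.count_pos_iff.mpr hm)

-- ---- the consonant queue ----

lemma consume_spec : ∀ (n : Nat) (X : List (List Nat)), (∀ g ∈ X, g ≠ []) →
    n < X.flatten.length →
    ∃ h t, pvConsume n X = h :: t ∧ h ≠ [] ∧ (∀ g ∈ t, g ≠ []) ∧
      h.headD 0 = X.flatten.getD n 0 ∧
      pvConsume (n + 1) X = (if h.tail = [] then t else h.tail :: t) := by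
  intro n
  induction n with
  | zero =>
    intro X hne hlen
    cases X with
    | nil => simp at hlen
    | cons g rest =>
      refine ⟨g, rest, rfl, hne g (by simp), fun g' hg' => hne g' (by simp [hg']), ?_, rfl⟩
      cases g with
      | nil => exact absurd rfl (hne [] (by simp))
      | cons a g' => simp
  | succ n ih =>
    intro X hne hlen
    cases X with
    | nil => simp at hlen
    | cons g rest =>
      obtain ⟨a, g', rfl⟩ : ∃ a g', g = a :: g' := by
        cases g with
        | nil => exact absurd rfl (hne [] (by simp))
        | cons a g' => exact ⟨a, g', rfl⟩
      have hstep : ∀ m, pvConsume (m + 1) ((a :: g') :: rest)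
          = pvConsume m (if g' = [] then rest else g' :: rest) := by
        intro m; simp [pvConsume]
      set X' : List (List Nat) := if g' = [] then rest else g' :: rest with hX'
      have hne' : ∀ g'' ∈ X', g'' ≠ [] := by
        intro g'' hg''
        by_cases hg : g' = []
        · rw [hX'] at hg''; rw [if_pos hg] at hg''; exact hne g'' (by simp [hg''])
        · rw [hX'] at hg''; rw [if_neg hg] at hg''
          rcases List.mem_cons.mp hg'' with h | h
          · subst h; exact hg
          · exact hne g'' (by simp [h])
      have hflat : X'.flatten = g' ++ rest.flatten := by
        by_cases hg : g' = []
        · rw [hX', if_pos hg, hg]; rfl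
        · rw [hX', if_neg hg]; rfl
      have hlen' : n < X'.flatten.length := by
        rw [hflat]
        simp only [List.flatten_cons, List.length_append, List.length_cons] at hlen ⊢
        omega
      obtain ⟨h, t, e1, e2, e3, e4, e5⟩ := ih X' hne' hlen'
      refine ⟨h, t, by rw [hstep n]; exact e1, e2, e3, ?_, by rw [hstep (n+1)]; exact e5⟩
      rw [e4, hflat]
      simp only [List.flatten_cons]
      rw [show ((a :: g') ++ rest.flatten).getD (n+1) 0 = (g' ++ rest.flatten).getD n 0 from by
        simp [List.getD]]

-- ---- lookup in a zipped sorted association list ----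

lemma find_zip_sorted : ∀ (xs ys : List Nat), xs.Pairwise (· < ·) → ys.length = xs.length →
    ∀ k ∈ xs, (xs.zip ys).find? (fun pq => pq.1 == k) = some (k, ys.getD (pvCnt xs k) 0) := by
  intro xs
  induction xs with
  | nil => intro ys _ _ k hk; simp at hk
  | cons x xs' ih =>
    intro ys hp hlen k hk
    cases ys with
    | nil => simp at hlen
    | cons y ys' =>
      rw [List.zip_cons_cons]
      by_cases hx : x = k
      · subst hx
        rw [List.find?_cons_of_pos (by simp)]
        have hcnt : pvCnt (x :: xs') x = 0 := by
          simp only [pvCnt, List.countP_eq_zero]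
          intro a ha
          rcases List.mem_cons.mp ha with h | h
          · subst h; simp
          · have := (List.pairwise_cons.mp hp).1 a h
            simp; omega
        rw [hcnt]
        rfl
      · rw [List.find?_cons_of_neg (p := fun pq : Nat × Nat => pq.1 == k) (by simpa using hx)]
        have hk' : k ∈ xs' := by
          rcases List.mem_cons.mp hk with h | h
          · exact absurd h.symm hx
          · exact h
        have hlt : x < k := (List.pairwise_cons.mp hp).1 k hk'
        have hcnt : pvCnt (x :: xs') k = pvCnt xs' k + 1 := by
          simp only [pvCnt, List.countP_cons, decide_eq_true hlt]
          simp
        rw [hcnt]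
        have := ih ys' (List.pairwise_cons.mp hp).2 (by simpa using hlen) k hk'
        rw [this]
        congr 1

-- ---- writing assignments into a table ----

lemma getD_foldl_set : ∀ (P : List (Nat × Nat)) (pm : List Nat) (i d : Nat),
    (P.map Prod.fst).Nodup → (∀ pq ∈ P, pq.1 < pm.length) →
    (P.foldl (fun a pq => a.set pq.1 pq.2) pm).getD i d
      = ((P.find? (fun pq => pq.1 == i)).map Prod.snd).getD (pm.getD i d) := by
  intro P
  induction P with
  | nil => intro pm i d _ _; simp
  | cons pq rest ih =>
    intro pm i d hnd hlt
    rw [List.foldl_cons]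
    have hnd' : (rest.map Prod.fst).Nodup := (List.nodup_cons.mp (by simpa using hnd)).2
    have hlt' : ∀ q ∈ rest, q.1 < (pm.set pq.1 pq.2).length := by
      intro q hq; rw [List.length_set]; exact hlt q (by simp [hq])
    rw [ih (pm.set pq.1 pq.2) i d hnd' hlt']
    by_cases hx : pq.1 = i
    · subst hx
      rw [List.find?_cons_of_pos (p := fun q : Nat × Nat => q.1 == pq.1) (by simp)]
      have hnone : rest.find? (fun q => q.1 == pq.1) = none := by
        rw [List.find?_eq_none]
        intro q hq
        have hmem : pq.1 ∉ rest.map Prod.fst := (List.nodup_cons.mp (by simpa using hnd)).1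
        simp only [beq_iff_eq]
        intro he
        exact hmem (by rw [← he]; exact List.mem_map_of_mem hq)
      rw [hnone]
      simp only [Option.map_none, Option.getD_none, Option.map_some, Option.getD_some]
      rw [List.getD, List.getElem?_set_self (hlt pq (by simp))]
      simp
    · rw [List.find?_cons_of_neg (p := fun q : Nat × Nat => q.1 == i) (by simpa using hx)]
      congr 1
      rw [List.getD, List.getD, List.getElem?_set_ne hx]

-- ---- the combined assignment list pvP ----

lemma map_fst_pvP (va : List String) : (pvP va).map Prod.fst = pvVpos va ++ pvCpos va := by
  simp only [pvP, List.map_append]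
  rw [List.map_fst_zip (le_of_eq (rotV_length va).symm),
    List.map_fst_zip (le_of_eq (rotC_length va).symm)]

lemma pvP_keys_nodup (va : List String) : ((pvP va).map Prod.fst).Nodup := by
  rw [map_fst_pvP]
  exact (vpos_nodup va).append (cpos_nodup va) (fun a ha => vpos_cpos_disjoint ha)

lemma pvP_keys_lt (va : List String) : ∀ pq ∈ pvP va, pq.1 < va.length := by
  intro pq hpq
  rcases List.mem_append.mp hpq with h | h
  · exact (mem_vpos.mp (List.of_mem_zip h).1).1
  · exact (mem_cpos.mp (List.of_mem_zip h).1).1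

lemma sigma_vowel {va : List String} {k : Nat} (hk : k ∈ pvVpos va) :
    pvSigma va k = (pvRotV va).getD (pvCnt (pvVpos va) k) 0 := by
  unfold pvSigma pvP
  rw [List.find?_append,
    find_zip_sorted (pvVpos va) (pvRotV va) (vpos_sorted va) (rotV_length va) k hk]
  simp

lemma sigma_cons {va : List String} {k : Nat} (hk : k ∈ pvCpos va) (hnk : k ∉ pvVpos va) :
    pvSigma va k = (pvRotC va).getD (pvCnt (pvCpos va) k) 0 := by
  unfold pvSigma pvP
  rw [List.find?_append]
  have h1 : ((pvVpos va).zip (pvRotV va)).find? (fun pq => pq.1 == k) = none := by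
    rw [List.find?_eq_none]
    intro pq hpq
    simp only [beq_iff_eq]
    intro he
    exact hnk (he ▸ (List.of_mem_zip hpq).1)
  rw [h1, find_zip_sorted (pvCpos va) (pvRotC va) (cpos_sorted va) (rotC_length va) k hk]
  simp

lemma sigma_id {va : List String} {k : Nat} (h1 : k ∉ pvVpos va) (h2 : k ∉ pvCpos va) :
    pvSigma va k = k := by
  unfold pvSigma pvP
  rw [List.find?_append]
  have e1 : ((pvVpos va).zip (pvRotV va)).find? (fun pq => pq.1 == k) = none := by
    rw [List.find?_eq_none]
    intro pq hpq
    simp only [beq_iff_eq]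
    exact fun he => h1 (he ▸ (List.of_mem_zip hpq).1)
  have e2 : ((pvCpos va).zip (pvRotC va)).find? (fun pq => pq.1 == k) = none := by
    rw [List.find?_eq_none]
    intro pq hpq
    simp only [beq_iff_eq]
    exact fun he => h2 (he ▸ (List.of_mem_zip hpq).1)
  rw [e1, e2]
  rfl

-- ---- B's nested fold is the fold over pvP ----

lemma foldl_nested (X : List (List Nat)) (f : List Nat → List (Nat × Nat)) (init : List Nat) :
    X.foldl (fun pm g => (f g).foldl (fun pm pq => pm.set pq.1 pq.2) pm) init
      = (X.flatMap f).foldl (fun pm pq => pm.set pq.1 pq.2) init := by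
  induction X generalizing init with
  | nil => rfl
  | cons g t ih => simp [List.flatMap_cons, List.foldl_append, ih]

lemma flatMap_zip (X : List (List Nat)) :
    X.flatMap (fun g => g.zip (vcRotR g)) = X.flatten.zip ((X.map vcRotR).flatten) := by
  induction X with
  | nil => rfl
  | cons g t ih =>
    simp only [List.flatMap_cons, List.flatten_cons, List.map_cons]
    rw [List.zip_append (vcRotR_length g).symm, ih]

lemma alt_eq (va : List String) (n : Int) :
    v_c_alt va n
      = PySem.Str.join "" ((List.range va.length).map (fun i => va.getD (pvSigma va i) "")) := by
  simp only [v_c_alt]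
  rw [foldl_nested]
  rw [show (List.foldl (vcGroupStep va) ([], []) (List.range va.length)) = pvSt va from rfl]
  rw [show ((pvSt va).1 ++ if (pvSt va).2 = [] then [] else [(pvSt va).2]) = pvReal va from rfl]
  rw [show ((List.range va.length).filter (fun i => va.getD i "" ∈ vcVowels)) = pvVpos va from rfl]
  rw [show (List.drop 1 (pvVpos va) ++ List.take 1 (pvVpos va)) = pvRotV va from rfl]
  rw [flatMap_zip, real_flatten]
  rw [← List.foldl_append]
  rw [show ((pvVpos va).zip (pvRotV va) ++ (pvCpos va).zip ((pvReal va).map vcRotR).flatten)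
      = pvP va from rfl]
  congr 1
  apply List.map_congr_left
  intro i hi
  have hiL : i < va.length := List.mem_range.mp hi
  rw [getD_foldl_set (pvP va) (List.range va.length) i i (pvP_keys_nodup va)
    (by rw [List.length_range]; exact pvP_keys_lt va)]
  rw [show (List.range va.length).getD i i = i from by
    rw [List.getD, List.getElem?_range hiL]; rfl]
  rfl

-- ---- A's reconstruction loop ----

lemma getD_set_ne {α : Type} {l : List α} {a j : Nat} {v d : α} (h : a ≠ j) :
    (l.set a v).getD j d = l.getD j d := by
  rw [List.getD, List.getD, List.getElem?_set_ne h]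

lemma getD_set_self {α : Type} {l : List α} {a : Nat} {v d : α} (h : a < l.length) :
    (l.set a v).getD a d = v := by
  rw [List.getD, List.getElem?_set_self h]
  rfl

lemma replay_skip {copy msg : List String} {vq : List Nat} {gq : List (List Nat)} {i : Nat}
    (h : ¬ PySem.Str.strIsalpha (msg.getD i "") = true) :
    vcReplayStep copy (msg, vq, gq) i = (msg, vq, gq) := by
  simp only [vcReplayStep]
  rw [if_pos h]

lemma replay_vowel {copy msg : List String} {vq : List Nat} {gq : List (List Nat)} {i : Nat}
    (hA : PySem.Str.strIsalpha (msg.getD i "") = true)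
    (hV : copy.getD i "" ∈ vcVowels) (hvq : vq ≠ []) :
    vcReplayStep copy (msg, vq, gq) i
      = (msg.set i (copy.getD (vq.headD 0) ""), vq.tail, gq) := by
  simp only [vcReplayStep]
  rw [if_neg (not_not_intro hA), if_pos ⟨hV, hvq⟩]

lemma replay_cons {copy msg : List String} {vq : List Nat} {gq : List (List Nat)} {i : Nat}
    (hA : PySem.Str.strIsalpha (msg.getD i "") = true)
    (hnV : copy.getD i "" ∉ vcVowels) (hgq : gq ≠ [])
    (hlow : PySem.Str.lower (copy.getD i "") ∉ vcLowVowels) :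
    vcReplayStep copy (msg, vq, gq) i
      = (msg.set i (copy.getD ((gq.headD []).headD 0) ""), vq,
          if (gq.headD []).tail = [] then gq.tail else (gq.headD []).tail :: gq.tail) := by
  simp only [vcReplayStep]
  rw [if_neg (not_not_intro hA), if_neg (fun hc => hnV hc.1), if_pos ⟨hgq, hlow⟩]

lemma X_nonempty (va : List String) : ∀ g ∈ pvX va, g ≠ [] := by
  intro g hg
  obtain ⟨g0, hg0, rfl⟩ := List.mem_map.mp hg
  intro he
  apply real_nonempty g0 hg0
  have hl := congrArg List.length he
  rw [vcRotR_length] at hl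
  exact List.length_eq_zero_iff.mp hl

lemma X_flatten_length (va : List String) : (pvX va).flatten.length = (pvCpos va).length :=
  rotC_length va

lemma replay_inv (va : List String) : ∀ (m k : Nat) (msg : List String),
    k + m = va.length → msg.length = va.length →
    (∀ j, k ≤ j → msg.getD j "" = va.getD j "") →
    (((List.range' k m).foldl (vcReplayStep va)
        (msg, (pvRotV va).drop (pvCnt (pvVpos va) k),
          pvConsume (pvCnt (pvCpos va) k) (pvX va) ++ pvT va)).1.length = va.length)
    ∧ ∀ i, ((List.range' k m).foldl (vcReplayStep va)
        (msg, (pvRotV va).drop (pvCnt (pvVpos va) k),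
          pvConsume (pvCnt (pvCpos va) k) (pvX va) ++ pvT va)).1.getD i ""
        = if k ≤ i ∧ i < va.length then va.getD (pvSigma va i) "" else msg.getD i "" := by
  intro m
  induction m with
  | zero =>
    intro k msg hkm hlen hsuf
    refine ⟨by simpa using hlen, ?_⟩
    intro i
    simp only [List.range'_zero, List.foldl_nil]
    by_cases hi : k ≤ i ∧ i < va.length
    · exact absurd hi (by omega)
    · rw [if_neg hi]
  | succ m ih =>
    intro k msg hkm hlen hsuf
    have hkL : k < va.length := by omega
    have hmsgk : msg.getD k "" = va.getD k "" := hsuf k (Nat.le_refl k)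
    rw [List.range'_succ, List.foldl_cons]
    by_cases hA : PySem.Str.strIsalpha (va.getD k "") = true
    · by_cases hV : va.getD k "" ∈ vcVowels
      · -- vowel position
        have hkv : k ∈ pvVpos va := mem_vpos.mpr ⟨hkL, hV⟩
        have hkc : k ∉ pvCpos va := vpos_cpos_disjoint hkv
        have hc : pvCnt (pvVpos va) k < (pvVpos va).length := cnt_lt_of_mem hkv
        have hvq : (pvRotV va).drop (pvCnt (pvVpos va) k) ≠ [] := by
          rw [ne_eq, List.drop_eq_nil_iff, rotV_length]
          omega
        rw [replay_vowel (by rw [hmsgk]; exact hA) hV hvq]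
        have e1 : pvCnt (pvVpos va) (k + 1) = pvCnt (pvVpos va) k + 1 := by
          rw [cnt_succ, count_nodup_mem (vpos_nodup va) hkv]
        have e2 : pvCnt (pvCpos va) (k + 1) = pvCnt (pvCpos va) k := by
          rw [cnt_succ, List.count_eq_zero_of_not_mem hkc]
          omega
        have etail : ((pvRotV va).drop (pvCnt (pvVpos va) k)).tail
            = (pvRotV va).drop (pvCnt (pvVpos va) k + 1) := by
          rw [List.tail_drop]
        have ehead : ((pvRotV va).drop (pvCnt (pvVpos va) k)).headD 0
            = (pvRotV va).getD (pvCnt (pvVpos va) k) 0 := by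
          rw [List.headD_eq_head?_getD, List.head?_drop]
          rfl
        set msg' := msg.set k (va.getD (((pvRotV va).drop (pvCnt (pvVpos va) k)).headD 0) "")
          with hmsg'
        have H := ih (k + 1) msg' (by omega) (by rw [hmsg', List.length_set]; exact hlen)
          (fun j hj => by
            rw [hmsg', getD_set_ne (by omega)]
            exact hsuf j (by omega))
        rw [e1, e2] at H
        rw [← etail] at H
        refine ⟨H.1, ?_⟩
        intro i
        rw [H.2 i]
        by_cases hik : i = k
        · subst hik
          rw [if_neg (by omega), if_pos ⟨Nat.le_refl i, hkL⟩]
          rw [hmsg', getD_set_self (by omega), ehead, sigma_vowel hkv]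
        · by_cases hcond : k ≤ i ∧ i < va.length
          · rw [if_pos hcond, if_pos ⟨by omega, hcond.2⟩]
          · rw [if_neg hcond, if_neg (by omega), hmsg', getD_set_ne (by omega)]
      · -- consonant position
        have hbc : pvBC va k = true := bc_true hA hV
        have hkc : k ∈ pvCpos va := mem_cpos.mpr ⟨hkL, hbc⟩
        have hkv : k ∉ pvVpos va := fun hm => hV (mem_vpos.mp hm).2
        have hc : pvCnt (pvCpos va) k < (pvX va).flatten.length := by
          rw [X_flatten_length]
          exact cnt_lt_of_mem hkc
        obtain ⟨h, t, e1, e2, e3, e4, e5⟩ :=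
          consume_spec (pvCnt (pvCpos va) k) (pvX va) (X_nonempty va) hc
        rw [e1]
        have hlow : PySem.Str.lower (va.getD k "") ∉ vcLowVowels :=
          fun hm => hV (lower_mem hm)
        rw [show (h :: t) ++ pvT va = h :: (t ++ pvT va) from rfl]
        rw [replay_cons (by rw [hmsgk]; exact hA) hV (List.cons_ne_nil h (t ++ pvT va)) hlow]
        have eh : (h :: (t ++ pvT va)).headD [] = h := rfl
        have ev : pvCnt (pvVpos va) (k + 1) = pvCnt (pvVpos va) k := by
          rw [cnt_succ, List.count_eq_zero_of_not_mem hkv]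
          omega
        have ec : pvCnt (pvCpos va) (k + 1) = pvCnt (pvCpos va) k + 1 := by
          rw [cnt_succ, count_nodup_mem (cpos_nodup va) hkc]
        have egq : (if ((h :: (t ++ pvT va)).headD []).tail = [] then (h :: (t ++ pvT va)).tail
              else ((h :: (t ++ pvT va)).headD []).tail :: (h :: (t ++ pvT va)).tail)
            = pvConsume (pvCnt (pvCpos va) (k + 1)) (pvX va) ++ pvT va := by
          rw [ec, e5, eh]
          by_cases ht : h.tail = []
          · rw [if_pos ht, if_pos ht]
            rfl
          · rw [if_neg ht, if_neg ht]
            rfl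
        set msg' := msg.set k (va.getD (((h :: (t ++ pvT va)).headD []).headD 0) "") with hmsg'
        have H := ih (k + 1) msg' (by omega) (by rw [hmsg', List.length_set]; exact hlen)
          (fun j hj => by
            rw [hmsg', getD_set_ne (by omega)]
            exact hsuf j (by omega))
        rw [ev] at H
        rw [← egq] at H
        refine ⟨H.1, ?_⟩
        intro i
        rw [H.2 i]
        by_cases hik : i = k
        · subst hik
          rw [if_neg (by omega), if_pos ⟨Nat.le_refl i, hkL⟩]
          rw [hmsg', getD_set_self (by omega), eh, e4, sigma_cons hkc hkv]
          rfl
        · by_cases hcond : k ≤ i ∧ i < va.length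
          · rw [if_pos hcond, if_pos ⟨by omega, hcond.2⟩]
          · rw [if_neg hcond, if_neg (by omega), hmsg', getD_set_ne (by omega)]
    · -- not a letter
      rw [replay_skip (by rw [hmsgk]; exact hA)]
      have hkv : k ∉ pvVpos va := fun hm => hA (vowel_alpha (mem_vpos.mp hm).2)
      have hkc : k ∉ pvCpos va := by
        intro hm
        have hb := (mem_cpos.mp hm).2
        rw [bc_false_nonalpha hA] at hb
        exact absurd hb (by simp)
      have ev : pvCnt (pvVpos va) (k + 1) = pvCnt (pvVpos va) k := by
        rw [cnt_succ, List.count_eq_zero_of_not_mem hkv]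
        omega
      have ec : pvCnt (pvCpos va) (k + 1) = pvCnt (pvCpos va) k := by
        rw [cnt_succ, List.count_eq_zero_of_not_mem hkc]
        omega
      have H := ih (k + 1) msg (by omega) hlen (fun j hj => hsuf j (by omega))
      rw [ev, ec] at H
      refine ⟨H.1, ?_⟩
      intro i
      rw [H.2 i]
      by_cases hik : i = k
      · subst hik
        rw [if_neg (by omega), if_pos ⟨Nat.le_refl i, hkL⟩, sigma_id hkv hkc, hmsgk]
      · by_cases hcond : k ≤ i ∧ i < va.length
        · rw [if_pos hcond, if_pos ⟨by omega, hcond.2⟩]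
        · rw [if_neg hcond, if_neg (by omega)]

lemma gq0_eq (va : List String) :
    ((pvSt va).1 ++ [(pvSt va).2]).map vcRotR = pvX va ++ pvT va := by
  unfold pvX pvReal pvT
  by_cases hc : (pvSt va).2 = []
  · rw [if_pos hc, if_pos hc, List.append_nil, List.map_append, hc]
    rfl
  · rw [if_neg hc, if_neg hc, List.append_nil]

lemma a_eq (va : List String) (n : Int) :
    v_c va n
      = PySem.Str.join "" ((List.range va.length).map (fun i => va.getD (pvSigma va i) "")) := by
  simp only [v_c]
  rw [show (List.foldl (vcGroupStep va) ([], []) (List.range va.length)) = pvSt va from rfl]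
  rw [show ((List.range va.length).filter (fun i => va.getD i "" ∈ vcVowels)) = pvVpos va from rfl]
  rw [show (List.drop 1 (pvVpos va) ++ List.take 1 (pvVpos va)) = pvRotV va from rfl]
  rw [gq0_eq va]
  rw [List.range_eq_range']
  rw [show pvRotV va = (pvRotV va).drop (pvCnt (pvVpos va) 0) from by
    rw [cnt_zero, List.drop_zero]]
  rw [show pvX va ++ pvT va = pvConsume (pvCnt (pvCpos va) 0) (pvX va) ++ pvT va from by
    rw [cnt_zero]; rfl]
  have H := replay_inv va va.length 0 va (by omega) rfl (fun j _ => rfl)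
  congr 1
  apply List.ext_getElem
  · rw [H.1, List.length_map, List.length_range']
  intro i h1 h2
  have hiL : i < va.length := by rw [H.1] at h1; exact h1
  have hval := H.2 i
  rw [if_pos ⟨Nat.zero_le i, hiL⟩] at hval
  have hr : (List.range' 0 va.length)[i]'(by simpa using h2) = i := by
    rw [List.getElem_range']
    omega
  rw [← List.getD_eq_getElem _ "" h1, hval, List.getElem_map, hr]

-- ===== VERDICT (by name: the statement is the Claim_ definition above) =====
theorem v_c_spec : Claim_equal_v_c := by
  intro message_arr n _ _
  show v_c message_arr n = v_c_alt message_arr n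
  rw [a_eq, alt_eq]
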